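-- pv_equiv track=rewrite | github.com/dragonka79/root | thinkcspy3/7/7.26.5.py | sum_before_even
-- ===== SOURCE A (Python) =====
-- def sum_before_even(lista):
--     sumup = 0
--     for i in lista:
--         if i % 2 != 0:
--             sumup += i
--         else:
--             break
--     return sumup
-- ===== SOURCE B (Python) =====
-- def sum_before_even(lista):
--     # Stage 1: locate the index of the first even element (len(lista) if none).
--     k = next((i for i, x in enumerate(lista) if x % 2 == 0), len(lista))
--     # Stage 2: sum the prefix slice before it.
--     return sum(lista[:k])
-- ===== Notes on version B (the rewrite author's own statement) =====
-- stated objective: alternative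
-- what changed: B replaces the fused accumulate-until-break loop by two staged passes: it first locates the index of the first even element with next()/enumerate, then sums the slice before that index; no running accumulator with early break.
import Mathlib
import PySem

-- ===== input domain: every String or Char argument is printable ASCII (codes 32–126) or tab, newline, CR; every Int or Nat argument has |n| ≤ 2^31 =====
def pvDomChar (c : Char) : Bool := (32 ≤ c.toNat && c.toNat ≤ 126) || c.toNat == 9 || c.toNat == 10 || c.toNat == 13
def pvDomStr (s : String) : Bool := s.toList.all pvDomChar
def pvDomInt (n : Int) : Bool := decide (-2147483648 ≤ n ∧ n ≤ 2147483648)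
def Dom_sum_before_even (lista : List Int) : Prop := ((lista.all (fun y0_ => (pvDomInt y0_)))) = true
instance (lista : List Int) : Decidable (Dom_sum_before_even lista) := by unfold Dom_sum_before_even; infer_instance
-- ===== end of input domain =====

-- B stages the computation: find the index of the first even element, then sum the prefix slice; same O(n) cost.
-- ===== PORT A =====
-- A's loop with a running accumulator and break
def sumBeforeEvenLoop (lista : List Int) (sumup : Int) : Int :=
  match lista with
  | [] => sumup
  | i :: rest =>
    if PySem.Int.mod i 2 ≠ 0 then sumBeforeEvenLoop rest (sumup + i)
    else sumup

def sum_before_even (lista : List Int) : Int :=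
  sumBeforeEvenLoop lista 0

-- ===== PORT B =====
-- stage 1 of Source B: next((i for i, x in enumerate(lista) if x % 2 == 0), len(lista))
def firstEvenIdx (lista : List Int) : Nat :=
  match lista with
  | [] => 0
  | x :: rest => if PySem.Int.mod x 2 = 0 then 0 else firstEvenIdx rest + 1

-- stage 2: sum(lista[:k])
def sum_before_even_alt (lista : List Int) : Int :=
  (PySem.List.slice lista none (some (firstEvenIdx lista : Int))).sum

-- ===== PRECONDITION & SPEC =====
def Spec_sum_before_even (lista : List Int) (out : Int) : Prop := out = sum_before_even_alt lista
instance (lista : List Int) (out : Int) : Decidable (Spec_sum_before_even lista out) := by unfold Spec_sum_before_even; infer_instance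

-- ===== CLAIM (what is proved, stated in full; the proofs are below) =====
def Claim_equal_sum_before_even : Prop := ∀ (lista : List Int), Dom_sum_before_even lista → Spec_sum_before_even lista (sum_before_even lista)

-- ===== LEMMAS AND PROOFS =====
theorem slice_to_take (xs : List Int) (k : Nat) :
    PySem.List.slice xs none (some (k : Int)) = xs.take k := by
  simp [PySem.List.slice_to]

theorem loop_eq (lista : List Int) (acc : Int) :
    sumBeforeEvenLoop lista acc = acc + (lista.take (firstEvenIdx lista)).sum := by
  induction lista generalizing acc with
  | nil => simp [sumBeforeEvenLoop, firstEvenIdx]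
  | cons i rest ih =>
    by_cases h : i % 2 = 0
    · simp [sumBeforeEvenLoop, firstEvenIdx, h]
    · have h1 : i % 2 = 1 := by omega
      simp [sumBeforeEvenLoop, firstEvenIdx, h1, ih]
      ring

-- ===== VERDICT (by name: the statement is the Claim_ definition above) =====
theorem sum_before_even_spec : Claim_equal_sum_before_even := by
  intro lista _
  unfold Spec_sum_before_even sum_before_even sum_before_even_alt
  rw [slice_to_take]
  simp [loop_eq]
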